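-- pv_equiv track=rewrite | github.com/oshkosher/advent2025 | advent.py | sparse_to_grid
-- ===== SOURCE A (Python) =====
-- def sparse_size(sparse_grid):
--     """
--     Returns (min_row, height, min_col, width)
--     """
--     first = True
--     for r,c in sparse_grid.keys():
--         if first:
--             first = False
--             min_r = max_r = r
--             min_c = max_c = c
--         else:
--             min_r = min(min_r, r)
--             min_c = min(min_c, c)
--             max_r = max(max_r, r)
--             max_c = max(max_c, c)
--     return (min_r, max_r - min_r + 1,
--             min_c, max_c - min_c + 1)
--
-- def sparse_to_grid(sparse_grid, empty='.', split_rows_into_lists=False):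
--     """
--     Given a sparse grid, fill in a dense grid.
--     """
--     (min_row, height, min_col, width) = sparse_size(sparse_grid)
--
--     def makeRow(r):
--         row = [sparse_grid.get((r,c), empty)
--                for c in range(min_col, min_col+width)]
--         if split_rows_into_lists:
--             return row
--         else:
--             return ''.join(row)
--
--     return [makeRow(r) for r in range(min_row, min_row + height)]
-- ===== SOURCE B (Python) =====
-- def sparse_to_grid(sparse_grid, empty='.', split_rows_into_lists=False):
--     """
--     Dense grid by scatter: compute bounds with min/max, preallocate the
--     grid pre-filled with `empty`, then write each sparse cell once.
--     """
--     rows = [r for r, c in sparse_grid]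
--     cols = [c for r, c in sparse_grid]
--     min_row, min_col = min(rows), min(cols)
--     height = max(rows) - min_row + 1
--     width = max(cols) - min_col + 1
--     grid = [[empty] * width for _ in range(height)]
--     for (r, c), v in sparse_grid.items():
--         grid[r - min_row][c - min_col] = v
--     if split_rows_into_lists:
--         return grid
--     return [''.join(row) for row in grid]
-- ===== Notes on version B (the rewrite author's own statement) =====
-- stated objective: alternative
-- what changed: B computes the bounds with min()/max() over the key coordinates instead of A's first-flag running loop, and fills a preallocated empty-filled grid by scattering each sparse entry once (one write per dict item) instead of A's per-cell dict.get gather over the whole height*width rectangle.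
-- outside the precondition, e.g. on sparse_to_grid({(0, 0): '#'}, '.', True): A returns [['#']], B returns [['#']]
import Mathlib
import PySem

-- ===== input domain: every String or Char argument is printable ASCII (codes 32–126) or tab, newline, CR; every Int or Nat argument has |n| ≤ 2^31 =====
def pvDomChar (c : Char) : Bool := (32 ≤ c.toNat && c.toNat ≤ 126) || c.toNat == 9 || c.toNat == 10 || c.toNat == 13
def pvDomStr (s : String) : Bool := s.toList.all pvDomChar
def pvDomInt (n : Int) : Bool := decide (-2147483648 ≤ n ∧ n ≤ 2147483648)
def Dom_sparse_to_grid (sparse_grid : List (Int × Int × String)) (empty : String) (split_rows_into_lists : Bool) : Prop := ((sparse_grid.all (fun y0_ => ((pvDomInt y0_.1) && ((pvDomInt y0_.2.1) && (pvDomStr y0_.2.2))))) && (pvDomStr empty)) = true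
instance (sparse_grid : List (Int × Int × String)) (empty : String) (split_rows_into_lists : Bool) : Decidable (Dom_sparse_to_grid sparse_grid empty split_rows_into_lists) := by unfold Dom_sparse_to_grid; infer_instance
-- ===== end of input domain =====

-- B replaces A's per-cell dict.get gather with a scatter into a preallocated grid and computes
-- the bounds with min/max instead of A's first-flag loop (objective: alternative decomposition).

-- ===== PORT A =====
-- first-flag loop over the keys: none = "first is still True", some = the running (min_r, max_r, min_c, max_c)
def pvFoldBounds (st : Option (Int × Int × Int × Int)) (k : Int × Int) : Option (Int × Int × Int × Int) :=
  match st with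
  | none => some (k.1, k.1, k.2, k.2)
  | some (mr, Mr, mc, Mc) => some (min mr k.1, max Mr k.1, min mc k.2, max Mc k.2)

-- returns (min_row, height, min_col, width); on an empty dict Python raises UnboundLocalError,
-- excluded by Pre_, so the Lean port returns a dummy there
def sparse_size (d : PySem.Dict (Int × Int) String) : Int × Int × Int × Int :=
  match d.keys.foldl pvFoldBounds none with
  | some (mr, Mr, mc, Mc) => (mr, Mr - mr + 1, mc, Mc - mc + 1)
  | none => (0, 0, 0, 0)

def sparse_to_grid (sparse_grid : List (Int × Int × String)) (empty : String) (split_rows_into_lists : Bool) : List String :=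
  let d : PySem.Dict (Int × Int) String := PySem.Dict.ofList (sparse_grid.map (fun p => ((p.1, p.2.1), p.2.2)))
  match sparse_size d with
  | (min_row, height, min_col, width) =>
    -- split_rows_into_lists=True makes Python return a list of LISTS (not of strings, outside
    -- the List String return type); Pre_ excludes it, the port joins in both cases
    (PySem.List.pyRange min_row (min_row + height) 1).map (fun r =>
      PySem.Str.join "" ((PySem.List.pyRange min_col (min_col + width) 1).map (fun c => d.getD (r, c) empty)))

-- ===== PORT B =====
-- grid[r-mr][c-mc] = v  (both indices are provably ≥ 0 since mr/mc are the minima, so toNat is exact)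
def pvScatter (mr mc : Int) (g : List (List String)) (p : (Int × Int) × String) : List (List String) :=
  g.set (p.1.1 - mr).toNat ((g.getD (p.1.1 - mr).toNat []).set (p.1.2 - mc).toNat p.2)

def sparse_to_grid_alt (sparse_grid : List (Int × Int × String)) (empty : String) (split_rows_into_lists : Bool) : List String :=
  let d : PySem.Dict (Int × Int) String := PySem.Dict.ofList (sparse_grid.map (fun p => ((p.1, p.2.1), p.2.2)))
  let rows := d.keys.map (fun k => k.1)
  let cols := d.keys.map (fun k => k.2)
  match PySem.List.min? rows (fun y => y), PySem.List.max? rows (fun y => y),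
        PySem.List.min? cols (fun y => y), PySem.List.max? cols (fun y => y) with
  | some mr, some Mr, some mc, some Mc =>
    let height := (Mr - mr + 1).toNat
    let width := (Mc - mc + 1).toNat
    let grid := d.items.foldl (pvScatter mr mc) (List.replicate height (List.replicate width empty))
    -- split=True excluded by Pre_ (Python's value there is a list of lists), so join in both cases
    grid.map (fun row => PySem.Str.join "" row)
  | _, _, _, _ => []  -- min([]) raises ValueError in Python; excluded by Pre_

-- ===== PRECONDITION & SPEC =====
-- Pre_ excludes (a) the empty grid, where A raises UnboundLocalError (and B raises ValueError), and
-- (b) split_rows_into_lists=True, where A returns a list of LISTS of strings — not a value of the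
-- declared List String type, so it cannot be claimed here (B returns the same list of lists there).
def Pre_sparse_to_grid (sparse_grid : List (Int × Int × String)) (empty : String) (split_rows_into_lists : Bool) : Prop :=
  sparse_grid ≠ [] ∧ split_rows_into_lists = false
instance (sparse_grid : List (Int × Int × String)) (empty : String) (split_rows_into_lists : Bool) : Decidable (Pre_sparse_to_grid sparse_grid empty split_rows_into_lists) := by unfold Pre_sparse_to_grid; infer_instance

def pvWitness_sparse_to_grid : (List (Int × Int × String)) × String × Bool := ([(0, 0, "#"), (1, 1, "@")], ".", false)

def Spec_sparse_to_grid (sparse_grid : List (Int × Int × String)) (empty : String) (split_rows_into_lists : Bool) (out : List String) : Prop := out = sparse_to_grid_alt sparse_grid empty split_rows_into_lists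
instance (sparse_grid : List (Int × Int × String)) (empty : String) (split_rows_into_lists : Bool) (out : List String) : Decidable (Spec_sparse_to_grid sparse_grid empty split_rows_into_lists out) := by unfold Spec_sparse_to_grid; infer_instance

-- ===== CLAIM (what is proved, stated in full; the proofs are below) =====
def Claim_equal_sparse_to_grid : Prop := ∀ (sparse_grid : List (Int × Int × String)) (empty : String) (split_rows_into_lists : Bool), Dom_sparse_to_grid sparse_grid empty split_rows_into_lists → Pre_sparse_to_grid sparse_grid empty split_rows_into_lists → Spec_sparse_to_grid sparse_grid empty split_rows_into_lists (sparse_to_grid sparse_grid empty split_rows_into_lists)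

-- ===== LEMMAS AND PROOFS =====

-- A's first-flag bounds loop, once started, is the componentwise running min/max
lemma pvFoldBounds_some (t : List (Int × Int)) : ∀ (mr Mr mc Mc : Int),
    t.foldl pvFoldBounds (some (mr, Mr, mc, Mc)) =
      some ((t.map (fun k => k.1)).foldl min mr, (t.map (fun k => k.1)).foldl max Mr,
            (t.map (fun k => k.2)).foldl min mc, (t.map (fun k => k.2)).foldl max Mc) := by
  induction t with
  | nil => intro mr Mr mc Mc; rfl
  | cons k t ih => intro mr Mr mc Mc; simpa [pvFoldBounds] using ih _ _ _ _

lemma pvScatter_length (mr mc : Int) (g : List (List String)) (p : (Int × Int) × String) :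
    (pvScatter mr mc g p).length = g.length := by
  simp [pvScatter]

lemma pvScatter_foldl_length (mr mc : Int) (l : List ((Int × Int) × String)) :
    ∀ (g : List (List String)), (l.foldl (pvScatter mr mc) g).length = g.length := by
  induction l with
  | nil => intro g; rfl
  | cons p t ih => intro g; rw [List.foldl_cons, ih, pvScatter_length]

lemma pvScatter_rows (mr mc : Int) (w : Nat) (p : (Int × Int) × String) (g : List (List String))
    (h : ∀ row ∈ g, row.length = w) (ha : (p.1.1 - mr).toNat < g.length) :
    ∀ row ∈ pvScatter mr mc g p, row.length = w := by
  intro row hrow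
  rcases List.mem_or_eq_of_mem_set hrow with h1 | h2
  · exact h row h1
  · subst h2
    rw [List.length_set]
    have hg : g.getD (p.1.1 - mr).toNat [] ∈ g := by
      rw [List.getD_eq_getElem?_getD, List.getElem?_eq_getElem ha]
      exact List.getElem_mem ha
    exact h _ hg

lemma pvScatter_foldl_rows (mr mc : Int) (w : Nat) (l : List ((Int × Int) × String)) :
    ∀ (g : List (List String)), (∀ row ∈ g, row.length = w) →
    (∀ p ∈ l, (p.1.1 - mr).toNat < g.length) →
    ∀ row ∈ l.foldl (pvScatter mr mc) g, row.length = w := by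
  induction l with
  | nil => intro g hg _; exact hg
  | cons p t ih =>
    intro g hg hb
    rw [List.foldl_cons]
    exact ih _ (pvScatter_rows mr mc w p g hg (hb p (by simp)))
      (fun q hq => by rw [pvScatter_length]; exact hb q (by simp [hq]))

-- the scatter loop computed pointwise: the cell (i,j) holds the value of the (unique) entry whose
-- key is (mr+i, mc+j), and the initial cell otherwise
lemma pvGetD_set_self (g : List (List String)) (row : List String) (i : Nat) (hi : i < g.length) :
    (g.set i row).getD i [] = row := by
  rw [List.getD_eq_getElem?_getD, List.getElem?_set_self hi]
  rfl

lemma pvGetD_set_ne (g : List (List String)) (row : List String) (a i : Nat) (h : a ≠ i) :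
    (g.set a row).getD i [] = g.getD i [] := by
  rw [List.getD_eq_getElem?_getD, List.getElem?_set_ne h, ← List.getD_eq_getElem?_getD]

lemma pvGetDs_set_self (row : List String) (v : String) (j : Nat) (hj : j < row.length) :
    (row.set j v).getD j "" = v := by
  rw [List.getD_eq_getElem?_getD, List.getElem?_set_self hj]
  rfl

lemma pvGetDs_set_ne (row : List String) (v : String) (b j : Nat) (h : b ≠ j) :
    (row.set b v).getD j "" = row.getD j "" := by
  rw [List.getD_eq_getElem?_getD, List.getElem?_set_ne h, ← List.getD_eq_getElem?_getD]

lemma pvScatter_cell (mr mc : Int) (w : Nat) (l : List ((Int × Int) × String)) :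
    ∀ (g : List (List String)),
    (∀ row ∈ g, row.length = w) →
    (∀ p ∈ l, mr ≤ p.1.1 ∧ mc ≤ p.1.2 ∧ (p.1.1 - mr).toNat < g.length ∧ (p.1.2 - mc).toNat < w) →
    (l.map (fun p => p.1)).Nodup →
    ∀ (i j : Nat), i < g.length → j < w →
    ((l.foldl (pvScatter mr mc) g).getD i []).getD j "" =
      (match l.find? (fun p => p.1 == ((mr + i : Int), (mc + j : Int))) with
       | some p => p.2
       | none => (g.getD i []).getD j "") := by
  induction l with
  | nil => intro g _ _ _ i j _ _; rfl
  | cons p t ih =>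
    intro g hg hb hnd i j hi hj
    obtain ⟨hmr, hmc, ha, hbw⟩ := hb p (by simp)
    have hrowlen : (g.getD i []).length = w := by
      have : g.getD i [] ∈ g := by
        rw [List.getD_eq_getElem?_getD, List.getElem?_eq_getElem hi]
        exact List.getElem_mem hi
      exact hg _ this
    have hg' : ∀ row ∈ pvScatter mr mc g p, row.length = w := pvScatter_rows mr mc w p g hg ha
    have hlen' : (pvScatter mr mc g p).length = g.length := pvScatter_length mr mc g p
    have hb' : ∀ q ∈ t, mr ≤ q.1.1 ∧ mc ≤ q.1.2 ∧ (q.1.1 - mr).toNat < (pvScatter mr mc g p).length ∧ (q.1.2 - mc).toNat < w := by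
      intro q hq; rw [hlen']; exact hb q (by simp [hq])
    have hnd' : (t.map (fun p => p.1)).Nodup := (List.nodup_cons.mp hnd).2
    have hrest := ih (pvScatter mr mc g p) hg' hb' hnd' i j (by rw [hlen']; exact hi) hj
    rw [List.foldl_cons, hrest]
    by_cases hkey : p.1 = ((mr + i : Int), (mc + j : Int))
    · -- head writes the cell; no later entry shares its key
      have hfind : t.find? (fun q => q.1 == ((mr + i : Int), (mc + j : Int))) = none := by
        rw [List.find?_eq_none]
        intro q hq hqk
        have hqp : q.1 = p.1 := by rw [hkey]; exact beq_iff_eq.mp hqk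
        have hmem : p.1 ∈ t.map (fun p => p.1) := by
          rw [← hqp]; exact List.mem_map_of_mem hq
        exact (List.nodup_cons.mp hnd).1 hmem
      rw [hfind, List.find?_cons_of_pos (by simp [hkey])]
      have hai : (p.1.1 - mr).toNat = i := by
        have : p.1.1 = mr + i := by rw [hkey]
        omega
      have hbj : (p.1.2 - mc).toNat = j := by
        have : p.1.2 = mc + j := by rw [hkey]
        omega
      simp only [pvScatter, hai, hbj]
      rw [pvGetD_set_self _ _ _ hi, pvGetDs_set_self _ _ _ (by rw [hrowlen]; exact hj)]
    · -- head writes some other cell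
      rw [List.find?_cons_of_neg (by simp [hkey])]
      have hcell : ((pvScatter mr mc g p).getD i []).getD j "" = (g.getD i []).getD j "" := by
        by_cases hai : (p.1.1 - mr).toNat = i
        · have hbj : (p.1.2 - mc).toNat ≠ j := by
            intro hbj
            exact hkey (by
              have h1 : p.1.1 = mr + i := by omega
              have h2 : p.1.2 = mc + j := by omega
              exact Prod.ext h1 h2)
          simp only [pvScatter, hai]
          rw [pvGetD_set_self _ _ _ hi, pvGetDs_set_ne _ _ _ _ hbj]
        · simp only [pvScatter]
          rw [pvGetD_set_ne _ _ _ _ hai]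
      rw [hcell]

-- ===== VERDICT (by name: the statement is the Claim_ definition above) =====
-- the dense-grid equality: gather over ranges (A) = scatter into a preallocated grid (B),
-- given that mr/Mr/mc/Mc bound every key of the dict
lemma pvGrid_eq (d : PySem.Dict (Int × Int) String) (empty : String) (mr Mr mc Mc : Int)
    (hnd : (d.items.map (fun p => p.1)).Nodup)
    (hb1 : ∀ y ∈ d.keys, mr ≤ y.1) (hb2 : ∀ y ∈ d.keys, y.1 ≤ Mr)
    (hb3 : ∀ y ∈ d.keys, mc ≤ y.2) (hb4 : ∀ y ∈ d.keys, y.2 ≤ Mc) :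
    (PySem.List.pyRange mr (mr + (Mr - mr + 1)) 1).map (fun r =>
        PySem.Str.join "" ((PySem.List.pyRange mc (mc + (Mc - mc + 1)) 1).map
          (fun c => d.getD (r, c) empty))) =
      (d.items.foldl (pvScatter mr mc)
          (List.replicate (Mr - mr + 1).toNat (List.replicate (Mc - mc + 1).toNat empty))).map
        (fun row => PySem.Str.join "" row) := by
  set h : Nat := (Mr - mr + 1).toNat with hh
  set w : Nat := (Mc - mc + 1).toNat with hw
  set g0 : List (List String) := List.replicate h (List.replicate w empty) with hg0
  have hg0len : g0.length = h := List.length_replicate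
  have hg0rows : ∀ row ∈ g0, row.length = w := by
    intro row hrow
    rw [List.eq_of_mem_replicate hrow]
    exact List.length_replicate
  have hkitems : d.keys = d.items.map (fun p => p.1) := rfl
  have hbounds : ∀ p ∈ d.items, mr ≤ p.1.1 ∧ mc ≤ p.1.2 ∧
      (p.1.1 - mr).toNat < g0.length ∧ (p.1.2 - mc).toNat < w := by
    intro p hp
    have hkm : p.1 ∈ d.keys := by
      rw [hkitems]; exact List.mem_map_of_mem hp
    have l1 := hb1 p.1 hkm; have l2 := hb2 p.1 hkm
    have l3 := hb3 p.1 hkm; have l4 := hb4 p.1 hkm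
    refine ⟨l1, l3, ?_, ?_⟩
    · rw [hg0len, hh]; omega
    · rw [hw]; omega
  set grid : List (List String) := d.items.foldl (pvScatter mr mc) g0 with hgrid
  have hgridlen : grid.length = h := by
    rw [hgrid, pvScatter_foldl_length, hg0len]
  have hgridrows : ∀ row ∈ grid, row.length = w :=
    pvScatter_foldl_rows mr mc w d.items g0 hg0rows (fun p hp => (hbounds p hp).2.2.1)
  apply List.ext_getElem
  · simp only [List.length_map, PySem.List.length_pyRange_one, hgridlen]
    rw [hh]; omega
  · intro i h1 h2
    simp only [List.getElem_map]
    rw [PySem.List.getElem_pyRange_one]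
    apply congrArg (PySem.Str.join "")
    have hi : i < h := by
      rw [List.length_map, hgridlen] at h2; exact h2
    apply List.ext_getElem
    · simp only [List.length_map, PySem.List.length_pyRange_one]
      have h4 : i < grid.length := by rw [hgridlen]; exact hi
      rw [hgridrows grid[i] (List.getElem_mem h4), hw]
      omega
    · intro j h3 h4
      simp only [List.getElem_map]
      rw [PySem.List.getElem_pyRange_one]
      have h5 : i < grid.length := by rw [hgridlen]; exact hi
      have hj : j < w := by rw [← hgridrows grid[i] (List.getElem_mem h5)]; exact h4
      have hrow : grid.getD i [] = grid[i] := by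
        rw [List.getD_eq_getElem?_getD, List.getElem?_eq_getElem h5]; rfl
      have hgetB : grid[i][j] = (grid.getD i []).getD j "" := by
        rw [hrow, List.getD_eq_getElem?_getD, List.getElem?_eq_getElem h4]; rfl
      rw [hgetB, hgrid, pvScatter_cell mr mc w d.items g0 hg0rows hbounds hnd i j
        (by rw [hg0len]; exact hi) hj]
      have hbase : (g0.getD i []).getD j "" = empty := by
        rw [hg0, List.getD_replicate _ hi, List.getD_replicate _ hj]
      cases hf : d.items.find? (fun p => p.1 == ((mr + i : Int), (mc + j : Int))) with
      | none =>
        simp only [PySem.Dict.getD, PySem.Dict.get?, hf, Option.map_none, Option.getD_none]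
        exact hbase.symm
      | some p =>
        simp only [PySem.Dict.getD, PySem.Dict.get?, hf, Option.map_some, Option.getD_some]

theorem sparse_to_grid_spec : Claim_equal_sparse_to_grid := by
  intro sg empty split hDom hPre
  obtain ⟨hne, hsplit⟩ := hPre
  subst hsplit
  unfold Spec_sparse_to_grid
  simp only [sparse_to_grid, sparse_to_grid_alt]
  set ps : List ((Int × Int) × String) := sg.map (fun p => ((p.1, p.2.1), p.2.2)) with hps
  set d : PySem.Dict (Int × Int) String := PySem.Dict.ofList ps with hd
  have hkeq : d.keys = PySem.Set.update PySem.Dict.empty.keys (ps.map (fun p => p.1)) :=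
    PySem.Dict.keys_foldl_insert_key (l := ps) (key := fun p => p.1) (f := fun _ p => p.2)
      (d := PySem.Dict.empty)
  have hk0 : d.keys ≠ [] := by
    cases sg with
    | nil => exact absurd rfl hne
    | cons q rest =>
      intro hnil
      have hmem : (q.1, q.2.1) ∈ d.keys := by
        rw [hkeq, PySem.Dict.keys_empty]
        exact (PySem.Set.mem_update _ _ _).mpr (Or.inr (by simp [hps]))
      rw [hnil] at hmem
      exact List.not_mem_nil hmem
  obtain ⟨k, t, hk⟩ : ∃ k t, d.keys = k :: t := by
    cases hke : d.keys with
    | nil => exact absurd hke hk0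
    | cons k t => exact ⟨k, t, rfl⟩
  have hsize : sparse_size d =
      ((t.map (fun k => k.1)).foldl min k.1,
       (t.map (fun k => k.1)).foldl max k.1 - (t.map (fun k => k.1)).foldl min k.1 + 1,
       (t.map (fun k => k.2)).foldl min k.2,
       (t.map (fun k => k.2)).foldl max k.2 - (t.map (fun k => k.2)).foldl min k.2 + 1) := by
    unfold sparse_size
    rw [hk, List.foldl_cons]
    show (match t.foldl pvFoldBounds (some (k.1, k.1, k.2, k.2)) with
      | some (mr, Mr, mc, Mc) => (mr, Mr - mr + 1, mc, Mc - mc + 1)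
      | none => (0, 0, 0, 0)) = _
    rw [pvFoldBounds_some]
  have hmin1 : PySem.List.min? (d.keys.map (fun k => k.1)) (fun y => y) =
      some ((t.map (fun k => k.1)).foldl min k.1) := by
    rw [hk, List.map_cons, PySem.List.min?_id_cons]
  have hmax1 : PySem.List.max? (d.keys.map (fun k => k.1)) (fun y => y) =
      some ((t.map (fun k => k.1)).foldl max k.1) := by
    rw [hk, List.map_cons, PySem.List.max?_id_cons]
  have hmin2 : PySem.List.min? (d.keys.map (fun k => k.2)) (fun y => y) =
      some ((t.map (fun k => k.2)).foldl min k.2) := by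
    rw [hk, List.map_cons, PySem.List.min?_id_cons]
  have hmax2 : PySem.List.max? (d.keys.map (fun k => k.2)) (fun y => y) =
      some ((t.map (fun k => k.2)).foldl max k.2) := by
    rw [hk, List.map_cons, PySem.List.max?_id_cons]
  rw [hsize, hmin1, hmax1, hmin2, hmax2]
  exact pvGrid_eq d empty _ _ _ _
    (PySem.Dict.nodup_keys_ofList ps)
    (fun y hy => PySem.List.min?_isMin hmin1 y.1 (List.mem_map_of_mem hy))
    (fun y hy => PySem.List.max?_isMax hmax1 y.1 (List.mem_map_of_mem hy))
    (fun y hy => PySem.List.min?_isMin hmin2 y.2 (List.mem_map_of_mem hy))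
    (fun y hy => PySem.List.max?_isMax hmax2 y.2 (List.mem_map_of_mem hy))
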